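-- pv_equiv track=rewrite | github.com/jannathshaik123/TF-Binding-Sites | workflow/dimer-Jannath/dimer_finder.py | extract_motif_instances
-- ===== SOURCE A (Python) =====
-- def extract_motif_instances(sequences, motif1, motif2, spacing, max_mismatches=1):
--     """
--     Extract instances of the motifs from the sequences allowing for mismatches
--     """
--     motif1_instances = []
--     motif2_instances = []
--
--     dimer_pattern = motif1 + '.' * spacing + motif2
--     pattern_len = len(dimer_pattern)
--
--     for seq in sequences:
--         if len(seq) < pattern_len:
--             continue
--
--         for i in range(len(seq) - pattern_len + 1):
--             window = seq[i:i+pattern_len]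
--
--             # Check first motif with allowed mismatches
--             mismatches1 = sum(c1 != c2 for c1, c2 in zip(motif1, window[:len(motif1)]))
--
--             # Check second motif with allowed mismatches
--             motif2_start = len(motif1) + spacing
--             mismatches2 = sum(c1 != c2 for c1, c2 in zip(motif2, window[motif2_start:motif2_start+len(motif2)]))
--
--             if mismatches1 <= max_mismatches and mismatches2 <= max_mismatches:
--                 motif1_instances.append(window[:len(motif1)])
--                 motif2_instances.append(window[motif2_start:motif2_start+len(motif2)])
--                 break  # Only count one instance per sequence
--
--     return motif1_instances, motif2_instances
-- ===== SOURCE B (Python) =====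
-- def extract_motif_instances(sequences, motif1, motif2, spacing, max_mismatches=1):
--     L1, L2 = len(motif1), len(motif2)
--     off = L1 + spacing
--     plen = off + L2
--     out1, out2 = [], []
--     for seq in sequences:
--         n = len(seq) - plen + 1
--         if n <= 0:
--             continue
--         # Column-wise mismatch accumulation: one pass per motif POSITION, adding that
--         # aligned column's mismatches into every window's counter at once.
--         mm1 = [0] * n
--         for p, ch in enumerate(motif1):
--             col = seq[p:p + n]
--             mm1 = [m + (c != ch) for m, c in zip(mm1, col)]
--         mm2 = [0] * n
--         for p, ch in enumerate(motif2):
--             col = seq[off + p:off + p + n]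
--             mm2 = [m + (c != ch) for m, c in zip(mm2, col)]
--         for i in range(n):
--             if mm1[i] <= max_mismatches and mm2[i] <= max_mismatches:
--                 out1.append(seq[i:i + L1])
--                 out2.append(seq[i + off:i + off + L2])
--                 break
--     return out1, out2
-- ===== Notes on version B (the rewrite author's own statement) =====
-- stated objective: alternative
-- what changed: Replaced A's window-major scan (each window re-checks both whole motifs) by motif-position-major (column-wise) accumulation: for each motif position one pass adds that aligned column's mismatches into per-window counter tables, which a final first-hit pass joins.
-- outside the precondition, e.g. on extract_motif_instances(['AC', 'AC'], 'ACA', 'ACA', -4, 1): A returns ([], []), B raises IndexError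
import Mathlib
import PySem

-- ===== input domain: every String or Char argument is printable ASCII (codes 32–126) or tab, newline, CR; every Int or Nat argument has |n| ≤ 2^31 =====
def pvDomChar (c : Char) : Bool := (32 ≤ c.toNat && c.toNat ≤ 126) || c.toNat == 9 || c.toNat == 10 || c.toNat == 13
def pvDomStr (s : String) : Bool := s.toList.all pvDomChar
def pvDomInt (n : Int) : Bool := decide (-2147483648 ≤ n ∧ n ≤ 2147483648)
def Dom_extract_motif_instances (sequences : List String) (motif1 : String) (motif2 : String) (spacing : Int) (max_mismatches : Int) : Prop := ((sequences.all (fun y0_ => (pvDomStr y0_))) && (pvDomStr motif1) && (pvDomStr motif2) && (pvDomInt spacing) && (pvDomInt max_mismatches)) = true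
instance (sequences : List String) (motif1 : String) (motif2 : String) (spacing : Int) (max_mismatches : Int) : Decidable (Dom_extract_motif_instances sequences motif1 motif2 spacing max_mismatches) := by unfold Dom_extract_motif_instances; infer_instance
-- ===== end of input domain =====

-- B replaces A's window-major double mismatch check by motif-position-major (column-wise)
-- accumulation of two mismatch-count tables, joined by one first-hit pass ("alternative").

-- ===== PORT A =====
-- sum(c1 != c2 for c1, c2 in zip(m, w))
def pvMM (m w : List Char) : Int :=
  ((m.zip w).map (fun p => if p.1 ≠ p.2 then (1 : Int) else 0)).sum

-- A's inner 'for i in range(...): ... break' loop, over the remaining indices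
def pvAScan (seqL m1L m2L : List Char) (spacing mm : Int) (plen : Nat) :
    List Int → Option (List Char × List Char)
  | [] => none
  | i :: rest =>
    let window := PySem.List.slice seqL (some i) (some (i + (plen : Int)))
    let w1 := PySem.List.slice window none (some ((m1L.length : Int)))
    let mm1 := pvMM m1L w1
    let m2s : Int := (m1L.length : Int) + spacing
    let w2 := PySem.List.slice window (some m2s) (some (m2s + (m2L.length : Int)))
    let mm2 := pvMM m2L w2
    if mm1 ≤ mm ∧ mm2 ≤ mm then some (w1, w2)
    else pvAScan seqL m1L m2L spacing mm plen rest

def extract_motif_instances (sequences : List String) (motif1 : String) (motif2 : String) (spacing : Int) (max_mismatches : Int) : List String × List String :=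
  let dimer := motif1.toList ++ List.replicate spacing.toNat '.' ++ motif2.toList
  let plen := dimer.length
  sequences.foldl (fun acc seq =>
    if seq.toList.length < plen then acc
    else
      match pvAScan seq.toList motif1.toList motif2.toList spacing max_mismatches plen
          (PySem.List.pyRange 0 ((seq.toList.length : Int) - (plen : Int) + 1) 1) with
      | some (w1, w2) => (acc.1 ++ [String.ofList w1], acc.2 ++ [String.ofList w2])
      | none => acc) ([], [])

-- ===== PORT B =====
-- mm = [m + (c != ch) for m, c in zip(mm, col)]   (one column update of Source B)
def pvColUpd (mm : List Int) (col : List Char) (ch : Char) : List Int :=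
  (mm.zip col).map (fun mc => mc.1 + if mc.2 ≠ ch then (1 : Int) else 0)

-- the 'for p, ch in enumerate(motif): col = seq[base+p : base+p+n]; mm = …' loop of Source B
def pvColAcc (s : List Char) (n : Nat) (motif : List Char) (base : Int) : List Int :=
  (PySem.List.enumerate motif 0).foldl
    (fun mm pc =>
      pvColUpd mm (PySem.List.slice s (some (base + pc.1)) (some (base + pc.1 + (n : Int)))) pc.2)
    (List.replicate n 0)

def extract_motif_instances_alt (sequences : List String) (motif1 : String) (motif2 : String) (spacing : Int) (max_mismatches : Int) : List String × List String :=
  let L1 := motif1.toList.length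
  let L2 := motif2.toList.length
  let off : Int := (L1 : Int) + spacing
  let plen : Int := off + (L2 : Int)
  sequences.foldl (fun acc seq =>
    let s := seq.toList
    let n : Int := (s.length : Int) - plen + 1
    if n ≤ 0 then acc
    else
      let nn := n.toNat
      let mm1 := pvColAcc s nn motif1.toList 0
      let mm2 := pvColAcc s nn motif2.toList off
      -- mm[i] is in range whenever the loop body runs on Pre_ (full-length columns); getD ports it
      match (List.range nn).find? (fun i =>
          decide (mm1.getD i 0 ≤ max_mismatches) && decide (mm2.getD i 0 ≤ max_mismatches)) with
      | some i =>
          (acc.1 ++ [String.ofList (PySem.List.slice s (some (i : Int)) (some ((i : Int) + (L1 : Int))))],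
           acc.2 ++ [String.ofList (PySem.List.slice s (some ((i : Int) + off)) (some ((i : Int) + off + (L2 : Int))))])
      | none => acc) ([], [])

-- ===== PRECONDITION & SPEC =====
-- Pre_ restricts to the function's natural domain 0 ≤ spacing: a negative spacing is a malformed
-- dimer gap, on which A's negative-index slicing compares accidental substrings (and B's truncated
-- columns make its final indexing raise).
def Pre_extract_motif_instances (sequences : List String) (motif1 : String) (motif2 : String) (spacing : Int) (max_mismatches : Int) : Prop :=
  0 ≤ spacing
instance (sequences : List String) (motif1 : String) (motif2 : String) (spacing : Int) (max_mismatches : Int) : Decidable (Pre_extract_motif_instances sequences motif1 motif2 spacing max_mismatches) := by unfold Pre_extract_motif_instances; infer_instance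

def pvWitness_extract_motif_instances : List String × String × String × Int × Int :=
  (["ACGTGT", "AAAA"], "AC", "GT", 1, 0)

def Spec_extract_motif_instances (sequences : List String) (motif1 : String) (motif2 : String) (spacing : Int) (max_mismatches : Int) (out : List String × List String) : Prop := out = extract_motif_instances_alt sequences motif1 motif2 spacing max_mismatches
instance (sequences : List String) (motif1 : String) (motif2 : String) (spacing : Int) (max_mismatches : Int) (out : List String × List String) : Decidable (Spec_extract_motif_instances sequences motif1 motif2 spacing max_mismatches out) := by unfold Spec_extract_motif_instances; infer_instance

-- ===== CLAIM (what is proved, stated in full; the proofs are below) =====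
def Claim_equal_extract_motif_instances : Prop := ∀ (sequences : List String) (motif1 : String) (motif2 : String) (spacing : Int) (max_mismatches : Int), Dom_extract_motif_instances sequences motif1 motif2 spacing max_mismatches → Pre_extract_motif_instances sequences motif1 motif2 spacing max_mismatches → Spec_extract_motif_instances sequences motif1 motif2 spacing max_mismatches (extract_motif_instances sequences motif1 motif2 spacing max_mismatches)

-- ===== LEMMAS AND PROOFS =====

theorem pv_ite_ne (a b : Char) : (if a ≠ b then (1 : Int) else 0) = if b ≠ a then 1 else 0 := by
  by_cases h : a = b
  · simp [h]
  · simp [h, Ne.symm h]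

-- A's inner loop, run on the indices 0,1,…, computes the first index whose two motif windows
-- both pass the mismatch test, together with those two windows.
theorem pv_scanA (s m1L m2L : List Char) (t : Nat) (mm : Int) :
    ∀ ks : List Nat,
    pvAScan s m1L m2L (t : Int) mm (m1L.length + t + m2L.length)
        (ks.map (fun k => ((k : Nat) : Int))) =
    (ks.find? (fun k =>
        decide (pvMM m1L ((s.drop k).take m1L.length) ≤ mm) &&
        decide (pvMM m2L ((s.drop (m1L.length + t + k)).take m2L.length) ≤ mm))).map
      (fun k => ((s.drop k).take m1L.length, (s.drop (m1L.length + t + k)).take m2L.length))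
  | [] => by simp [pvAScan]
  | k :: ks => by
    have hcast : ((m1L.length : Int) + (t : Int)) = ((m1L.length + t : Nat) : Int) := by
      push_cast; ring
    have hw1 : List.take m1L.length ((s.drop k).take (m1L.length + t + m2L.length))
        = (s.drop k).take m1L.length := by
      rw [List.take_take, Nat.min_eq_left (by omega)]
    have hw2 : List.take m2L.length (List.drop (m1L.length + t) ((s.drop k).take (m1L.length + t + m2L.length)))
        = (s.drop (m1L.length + t + k)).take m2L.length := by
      rw [List.drop_take, List.drop_drop, List.take_take]
      have hmin : min m2L.length (m1L.length + t + m2L.length - (m1L.length + t)) = m2L.length := by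
        omega
      rw [hmin, Nat.add_comm k (m1L.length + t)]
    rw [List.map_cons]
    simp only [pvAScan]
    rw [PySem.List.slice_natCast_add, PySem.List.slice_to_natCast, hcast,
      PySem.List.slice_natCast_add, hw1, hw2]
    by_cases h1 : pvMM m1L ((s.drop k).take m1L.length) ≤ mm ∧
        pvMM m2L ((s.drop (m1L.length + t + k)).take m2L.length) ≤ mm
    · rw [if_pos h1]
      simp [h1.1, h1.2]
    · rw [if_neg h1, pv_scanA s m1L m2L t mm ks]
      rcases Decidable.not_and_iff_not_or_not.mp h1 with h | h <;>
        simp [h]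

-- B's column accumulation over motif positions q, q+1, … adds, into every slot i of the running
-- table, exactly the window-major mismatch count of the remaining motif at window b+q+i.
theorem pv_colAcc (s : List Char) (n : Nat) :
    ∀ (m : List Char) (q b : Nat) (mm0 : List Int), mm0.length = n →
    b + q + m.length + n ≤ s.length + 1 →
    (PySem.List.enumerate m (q : Int)).foldl
      (fun mm pc =>
        pvColUpd mm (PySem.List.slice s (some ((b : Int) + pc.1)) (some ((b : Int) + pc.1 + (n : Int)))) pc.2)
      mm0
    = (List.range n).map (fun i => mm0.getD i 0 + pvMM m ((s.drop (b + q + i)).take m.length))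
  | [], q, b, mm0, hlen, _ => by
    apply List.ext_getElem (by simp [hlen])
    intro i h1 h2
    simp only [PySem.List.enumerate_nil, List.foldl_nil, List.getElem_map, List.getElem_range,
      pvMM, List.zip_nil_left, List.map_nil, List.sum_nil, add_zero]
    exact (List.getD_eq_getElem mm0 0 (by simp at h2; omega)).symm
  | ch :: m, q, b, mm0, hlen, hb => by
    have hcast : ((b : Int) + (q : Int)) = ((b + q : Nat) : Int) := by push_cast; ring
    have hcast1 : ((q : Int) + 1) = ((q + 1 : Nat) : Int) := by push_cast; ring
    have hcol : PySem.List.slice s (some ((b : Int) + (q : Int))) (some ((b : Int) + (q : Int) + (n : Int)))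
        = (s.drop (b + q)).take n := by
      rw [hcast, PySem.List.slice_natCast_add]
    have hcollen : ((s.drop (b + q)).take n).length = n := by
      simp only [List.length_take, List.length_drop]
      simp only [List.length_cons] at hb
      omega
    have hmm1len : (pvColUpd mm0 ((s.drop (b + q)).take n) ch).length = n := by
      simp [pvColUpd, hlen, hcollen]
    rw [PySem.List.enumerate_cons, List.foldl_cons, hcol, hcast1,
      pv_colAcc s n m (q + 1) b _ hmm1len (by simp only [List.length_cons] at hb; omega)]
    apply List.map_congr_left
    intro i hi
    have hin : i < n := List.mem_range.mp hi
    have hjlt : b + q + i < s.length := by simp only [List.length_cons] at hb; omega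
    have hgd : (pvColUpd mm0 ((s.drop (b + q)).take n) ch).getD i 0
        = mm0.getD i 0 + (if s[b + q + i] ≠ ch then (1 : Int) else 0) := by
      rw [List.getD_eq_getElem _ 0 (by rw [hmm1len]; exact hin)]
      simp only [pvColUpd, List.getElem_map, List.getElem_zip, List.getElem_take,
        List.getElem_drop]
      rw [List.getD_eq_getElem mm0 0 (by omega)]
    rw [hgd]
    have hidx : b + q + i + 1 = b + (q + 1) + i := by omega
    have hdropw : (s.drop (b + q + i)).take (ch :: m).length
        = s[b + q + i] :: (s.drop (b + (q + 1) + i)).take m.length := by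
      rw [List.drop_eq_getElem_cons hjlt, List.length_cons, List.take_succ_cons, hidx]
    rw [hdropw]
    simp only [pvMM, List.zip_cons_cons, List.map_cons, List.sum_cons]
    rw [pv_ite_ne]
    ring

-- B's table accumulation started from the all-zero table, with a Nat base
theorem pv_colAcc0 (s : List Char) (n : Nat) (m : List Char) (b : Nat)
    (hb : b + m.length + n ≤ s.length + 1) :
    pvColAcc s n m ((b : Nat) : Int)
      = (List.range n).map (fun i => pvMM m ((s.drop (b + i)).take m.length)) := by
  unfold pvColAcc
  have h := pv_colAcc s n m 0 b (List.replicate n 0) (by simp) (by omega)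
  rw [Nat.cast_zero] at h
  rw [h]
  apply List.map_congr_left
  intro i hi
  rw [List.getD_eq_getElem _ 0 (by simpa using List.mem_range.mp hi)]
  simp

-- first-match search only reads the predicate on the list's elements
theorem pv_findCongr {α : Type} (p q : α → Bool) :
    ∀ l : List α, (∀ x ∈ l, p x = q x) → l.find? p = l.find? q
  | [], _ => rfl
  | x :: l, h => by
    simp only [List.find?_cons, h x (List.mem_cons_self)]
    cases q x with
    | true => rfl
    | false => exact pv_findCongr p q l (fun y hy => h y (List.mem_cons_of_mem _ hy))

-- joining step: from the first found index both ports build the same appended pair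
theorem pv_last (s : List Char) (L1 t L2 : Nat) (acc : List String × List String)
    (p q : Nat → Bool) (l : List Nat) (hpq : ∀ x ∈ l, p x = q x) :
    (match Option.map (fun k => ((s.drop k).take L1, (s.drop (L1 + t + k)).take L2)) (l.find? p) with
      | some (w1, w2) => (acc.1 ++ [String.ofList w1], acc.2 ++ [String.ofList w2])
      | none => acc)
    = (match l.find? q with
      | some (i : Nat) =>
          (acc.1 ++ [String.ofList (PySem.List.slice s (some (i : Int)) (some ((i : Int) + (L1 : Int))))],
           acc.2 ++ [String.ofList (PySem.List.slice s (some ((i : Int) + ((L1 : Int) + (t : Int)))) (some ((i : Int) + ((L1 : Int) + (t : Int)) + (L2 : Int))))])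
      | none => acc) := by
  rw [← pv_findCongr p q l hpq]
  cases l.find? p with
  | none => rfl
  | some k =>
    have h2 : ((k : Int) + ((L1 : Int) + (t : Int))) = ((L1 + t + k : Nat) : Int) := by
      push_cast; ring
    simp only [Option.map_some, h2, PySem.List.slice_natCast_add]

-- ===== VERDICT (by name: the statement is the Claim_ definition above) =====
theorem extract_motif_instances_spec : Claim_equal_extract_motif_instances := by
  intro sequences motif1 motif2 spacing max_mismatches _ hpre
  obtain ⟨t, rfl⟩ : ∃ t : Nat, spacing = (t : Int) :=
    ⟨spacing.toNat, (Int.toNat_of_nonneg hpre).symm⟩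
  unfold Spec_extract_motif_instances extract_motif_instances extract_motif_instances_alt
  simp only [List.length_append, List.length_replicate, Int.toNat_natCast]
  congr 1
  funext acc seq
  set s := seq.toList with hs
  set L1 := motif1.toList.length with hL1
  set L2 := motif2.toList.length with hL2
  by_cases hlt : s.length < L1 + t + L2
  · rw [if_pos hlt, if_pos (by omega)]
  · rw [if_neg hlt, if_neg (by omega)]
    have hnn : ((s.length : Int) - ((L1 : Int) + (t : Int) + (L2 : Int)) + 1).toNat
        = s.length - (L1 + t + L2) + 1 := by omega
    have hbound : ((s.length : Int) - ((L1 + t + L2 : Nat) : Int) + 1)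
        = ((s.length : Int) - ((L1 : Int) + (t : Int) + (L2 : Int)) + 1) := by push_cast; ring
    set lim := s.length - (L1 + t + L2) + 1 with hlim
    have hoffcast : ((L1 : Int) + (t : Int)) = ((L1 + t : Nat) : Int) := by push_cast; ring
    rw [hbound, hnn, PySem.List.pyRange_one]
    simp only [zero_add, Int.sub_zero, hnn]
    rw [pv_scanA]
    have h1 : pvColAcc s lim motif1.toList 0
        = (List.range lim).map (fun i => pvMM motif1.toList ((s.drop i).take L1)) := by
      have h := pv_colAcc0 s lim motif1.toList 0 (by omega)
      simpa using h
    have h2 : pvColAcc s lim motif2.toList ((L1 : Int) + (t : Int))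
        = (List.range lim).map (fun i => pvMM motif2.toList ((s.drop (L1 + t + i)).take L2)) := by
      have h := pv_colAcc0 s lim motif2.toList (L1 + t) (by omega)
      rw [← hoffcast] at h
      exact h
    rw [h1, h2]
    apply pv_last
    intro x hx
    have hxlt : x < lim := List.mem_range.mp hx
    rw [List.getD_eq_getElem _ 0 (by simpa using hxlt), List.getD_eq_getElem _ 0 (by simpa using hxlt)]
    simp only [List.getElem_map, List.getElem_range]
    rw [← hL1, ← hL2]
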